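-- pv_equiv track=rewrite | github.com/quern-dev/quern | server/proxy/system_proxy.py | parse_networksetup_output
-- ===== SOURCE A (Python) =====
-- def parse_networksetup_output(output: str) -> tuple[bool, str, int]:
--     """Parse ``networksetup -getwebproxy`` / ``-getsecurewebproxy`` output.
--
--     Returns (enabled, server, port).
--     """
--     enabled = False
--     server = ""
--     port = 0
--
--     for line in output.splitlines():
--         line = line.strip()
--         if line.startswith("Enabled:"):
--             val = line.split(":", 1)[1].strip()
--             enabled = val.lower() in ("yes", "1", "true")
--         elif line.startswith("Server:"):
--             server = line.split(":", 1)[1].strip()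
--         elif line.startswith("Port:"):
--             try:
--                 port = int(line.split(":", 1)[1].strip())
--             except ValueError:
--                 port = 0
--
--     return enabled, server, port
-- ===== SOURCE B (Python) =====
-- def parse_networksetup_output(output: str) -> tuple[bool, str, int]:
--     """Parse ``networksetup -getwebproxy`` / ``-getsecurewebproxy`` output.
--
--     Returns (enabled, server, port).
--     """
--     d = {}
--     for line in output.splitlines():
--         line = line.strip()
--         key, sep, value = line.partition(":")
--         if sep:
--             d[key] = value.strip()
--     enabled = d.get("Enabled", "").lower() in ("yes", "1", "true")
--     server = d.get("Server", "")
--     try: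
--         port = int(d.get("Port", ""))
--     except ValueError:
--         port = 0
--     return enabled, server, port
-- ===== Notes on version B (the rewrite author's own statement) =====
-- stated objective: idiomatic
-- what changed: B replaces A's interleaved per-line startswith/elif branching by a single indexing pass (each line partitioned at its first colon into a key-to-value dict, last occurrence wins) followed by extraction of the three fields from the dict.
import Mathlib
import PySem

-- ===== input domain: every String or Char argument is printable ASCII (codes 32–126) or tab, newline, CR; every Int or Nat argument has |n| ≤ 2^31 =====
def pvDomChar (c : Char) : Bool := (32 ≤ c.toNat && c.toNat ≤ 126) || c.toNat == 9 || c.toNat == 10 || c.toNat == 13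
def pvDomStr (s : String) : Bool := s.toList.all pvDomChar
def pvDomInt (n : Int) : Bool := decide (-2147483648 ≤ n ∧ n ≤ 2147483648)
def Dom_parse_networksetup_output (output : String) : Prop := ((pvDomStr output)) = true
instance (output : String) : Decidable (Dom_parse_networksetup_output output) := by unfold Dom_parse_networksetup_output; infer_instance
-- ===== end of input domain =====

-- B replaces A's interleaved per-line prefix branching by a build-an-index pass
-- (dict key→value from each "key:value" line) followed by extraction of the three
-- fields; objective: simpler/idiomatic decomposition, same cost.


-- ===== PORT A =====
-- Python's `line.split(":", 1)[1]` is ported as pyGetD … 1 []; it is only reached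
-- inside a startswith("…:") branch, where index 1 exists, so the default is never used.
def pvStepA (st : Bool × String × Int) (raw : List Char) : Bool × String × Int :=
  let line := PySem.Chars.strip raw
  if PySem.Chars.startswith line "Enabled:".toList then
    let val := PySem.Chars.strip (PySem.List.pyGetD (PySem.Chars.splitOnMax line ":".toList 1) 1 [])
    let v := PySem.Chars.lower val
    ((v == "yes".toList || v == "1".toList || v == "true".toList), st.2.1, st.2.2)
  else if PySem.Chars.startswith line "Server:".toList then
    let val := PySem.Chars.strip (PySem.List.pyGetD (PySem.Chars.splitOnMax line ":".toList 1) 1 [])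
    (st.1, String.ofList val, st.2.2)
  else if PySem.Chars.startswith line "Port:".toList then
    let val := PySem.Chars.strip (PySem.List.pyGetD (PySem.Chars.splitOnMax line ":".toList 1) 1 [])
    (st.1, st.2.1,
      match PySem.Int.ofChars? val with   -- try: int(val) except ValueError: 0
      | some n => n
      | none => 0)
  else st

def parse_networksetup_output (output : String) : Bool × String × Int :=
  (PySem.Chars.splitlines output.toList).foldl pvStepA (false, "", 0)

-- ===== PORT B =====
-- `key, sep, value = line.partition(":")` ported by hand via the first-occurrence
-- find (exact for the one-char separator): sep nonempty iff find ≠ -1.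
def pvStepB (d : PySem.Dict (List Char) (List Char)) (raw : List Char) :
    PySem.Dict (List Char) (List Char) :=
  let line := PySem.Chars.strip raw
  let i := PySem.Chars.find line ":".toList
  if i = -1 then d
  else d.insert (line.take i.toNat) (PySem.Chars.strip (line.drop (i.toNat + 1)))

def parse_networksetup_output_alt (output : String) : Bool × String × Int :=
  let d := (PySem.Chars.splitlines output.toList).foldl pvStepB PySem.Dict.empty
  let e := PySem.Chars.lower (d.getD "Enabled".toList [])
  let enabled := (e == "yes".toList || e == "1".toList || e == "true".toList)
  let server := String.ofList (d.getD "Server".toList [])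
  let port :=
    match PySem.Int.ofChars? (d.getD "Port".toList []) with  -- try: int(…) except ValueError: 0
    | some n => n
    | none => 0
  (enabled, server, port)

-- ===== PRECONDITION & SPEC =====
def Spec_parse_networksetup_output (output : String) (out : Bool × String × Int) : Prop := out = parse_networksetup_output_alt output
instance (output : String) (out : Bool × String × Int) : Decidable (Spec_parse_networksetup_output output out) := by unfold Spec_parse_networksetup_output; infer_instance

-- ===== CLAIM (what is proved, stated in full; the proofs are below) =====
def Claim_equal_parse_networksetup_output : Prop := ∀ (output : String), Dom_parse_networksetup_output output → Spec_parse_networksetup_output output (parse_networksetup_output output)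

-- ===== LEMMAS AND PROOFS =====

-- extraction of the three fields from B's dict (proof-only helper)
def pvExtract (d : PySem.Dict (List Char) (List Char)) : Bool × String × Int :=
  let e := PySem.Chars.lower (d.getD "Enabled".toList [])
  ((e == "yes".toList || e == "1".toList || e == "true".toList),
   String.ofList (d.getD "Server".toList []),
   match PySem.Int.ofChars? (d.getD "Port".toList []) with
   | some n => n
   | none => 0)

-- any list containing ':' splits as (colon-free prefix) ++ ':' :: rest
lemma pv_first_colon (l : List Char) (h : ':' ∈ l) :
    ∃ k rest, l = k ++ ':' :: rest ∧ ':' ∉ k := by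
  induction l with
  | nil => cases h
  | cons c t ih =>
    by_cases hc : c = ':'
    · exact ⟨[], t, by simp [hc], by simp⟩
    · have ht : ':' ∈ t := by
        rcases List.mem_cons.mp h with hh | hh
        · exact absurd hh.symm hc
        · exact hh
      rcases ih ht with ⟨k, rest, hk, hnk⟩
      refine ⟨c :: k, rest, by simp [hk], ?_⟩
      intro hm
      rcases List.mem_cons.mp hm with hh | hh
      · exact hc hh.symm
      · exact hnk hh

lemma pv_find_go_colon (k rest : List Char) (hk : ':' ∉ k) (n : Nat) :
    PySem.Chars.find.go [':'] (k ++ ':' :: rest) n = (n : Int) + k.length := by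
  induction k generalizing n with
  | nil => simp [PySem.Chars.find.go, List.isPrefixOf]
  | cons c t ih =>
    have hc : c ≠ ':' := fun h => hk (by simp [h])
    rw [List.cons_append, PySem.Chars.find.go.eq_2]
    simp only [List.isPrefixOf]
    rw [if_neg (by simp; exact fun hh => hc hh.symm)]
    rw [ih (fun h => hk (List.mem_cons_of_mem _ h)) (n + 1)]
    simp only [List.length_cons]; push_cast; ring

lemma pv_find_colon (k rest : List Char) (hk : ':' ∉ k) :
    PySem.Chars.find (k ++ ':' :: rest) ":".toList = (k.length : Int) := by
  unfold PySem.Chars.find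
  rw [show (":".toList = [':']) from rfl, pv_find_go_colon k rest hk 0]
  simp

lemma pv_find_no_colon (l : List Char) (h : ':' ∉ l) :
    PySem.Chars.find l ":".toList = -1 := by
  rw [PySem.Chars.find_eq_neg_one_iff]
  intro hinf
  exact h (hinf.mem (by simp [show (":".toList = [':']) from rfl]))

-- splitOnMax.go after consuming the separator (maxsplit exhausted)
lemma pv_split_go_m0 (fuel : Nat) (rest : List Char) (acc : List (List Char)) :
    PySem.Chars.splitOnMax.go [':'] fuel 0 rest [] acc = (rest :: acc).reverse := by
  cases fuel with
  | zero => simp [PySem.Chars.splitOnMax.go]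
  | succ f =>
    cases rest with
    | nil => simp [PySem.Chars.splitOnMax.go]
    | cons c t => simp [PySem.Chars.splitOnMax.go]

lemma pv_split_go_colon (k rest cur : List Char) (acc : List (List Char)) (fuel : Nat)
    (hk : ':' ∉ k) (hf : k.length + 1 ≤ fuel) :
    PySem.Chars.splitOnMax.go [':'] fuel 1 (k ++ ':' :: rest) cur acc =
      acc.reverse ++ [cur.reverse ++ k, rest] := by
  induction k generalizing cur fuel with
  | nil =>
    cases fuel with
    | zero => omega
    | succ f =>
      rw [List.nil_append, PySem.Chars.splitOnMax.go]
      rw [if_neg (by omega), if_pos (by simp [List.isPrefixOf])]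
      simp [pv_split_go_m0]
  | cons c t ih =>
    have hc : c ≠ ':' := fun h => hk (by simp [h])
    cases fuel with
    | zero => simp at hf
    | succ f =>
      rw [List.cons_append, PySem.Chars.splitOnMax.go]
      simp only [List.isPrefixOf]
      rw [if_neg (by omega), if_neg (by simp; exact fun hh => hc hh.symm)]
      rw [ih (c :: cur) f (fun h => hk (List.mem_cons_of_mem _ h)) (by simp at hf ⊢; omega)]
      simp

lemma pv_split_colon (k rest : List Char) (hk : ':' ∉ k) :
    PySem.Chars.splitOnMax (k ++ ':' :: rest) ":".toList 1 = [k, rest] := by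
  unfold PySem.Chars.splitOnMax
  rw [if_neg (by norm_num)]
  rw [show (":".toList = [':']) from rfl, show ((1 : Int).toNat = 1) from rfl]
  rw [pv_split_go_colon k rest [] [] ((k ++ ':' :: rest).length + 1) hk (by simp)]
  simp

-- a colon-free prefix followed by ':' is unique
lemma pv_prefix_colon_unique (p k rest : List Char) (hp : ':' ∉ p) (hk : ':' ∉ k)
    (h : (p ++ [':']) <+: (k ++ ':' :: rest)) : p = k := by
  induction p generalizing k with
  | nil =>
    cases k with
    | nil => rfl
    | cons c t =>
      rcases h with ⟨s, hs⟩
      simp at hs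
      exact absurd hs.1.symm (fun hh => hk (by simp [hh]))
  | cons c t ih =>
    have hc : c ≠ ':' := fun h' => hp (by simp [h'])
    cases k with
    | nil =>
      rcases h with ⟨s, hs⟩
      simp at hs
      exact absurd hs.1 hc
    | cons c' t' =>
      rcases h with ⟨s, hs⟩
      simp at hs
      obtain ⟨rfl, hs2⟩ := hs
      have := ih t' (fun h' => hp (List.mem_cons_of_mem _ h')) (fun h' => hk (List.mem_cons_of_mem _ h')) ⟨s, by simpa using hs2⟩
      simp [this]

lemma pv_startswith_iff (K k rest : List Char) (hK : ':' ∉ K) (hk : ':' ∉ k) :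
    PySem.Chars.startswith (k ++ ':' :: rest) (K ++ [':']) = true ↔ k = K := by
  rw [PySem.Chars.startswith_iff]
  constructor
  · intro h; exact (pv_prefix_colon_unique K k rest hK hk h).symm
  · rintro rfl; exact ⟨rest, by simp⟩

lemma pv_startswith_no_colon (l K : List Char) (hl : ':' ∉ l) :
    PySem.Chars.startswith l (K ++ [':']) = false := by
  by_contra h
  have h' : PySem.Chars.startswith l (K ++ [':']) = true := by
    cases hh : PySem.Chars.startswith l (K ++ [':']) with
    | false => exact absurd hh h
    | true => rfl
  rw [PySem.Chars.startswith_iff] at h'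
  exact hl (h'.mem (by simp))

-- one line preserves the invariant
lemma pv_step (d : PySem.Dict (List Char) (List Char)) (raw : List Char) :
    pvStepA (pvExtract d) raw = pvExtract (pvStepB d raw) := by
  by_cases hcol : ':' ∈ PySem.Chars.strip raw
  · rcases pv_first_colon _ hcol with ⟨k, rest, hk, hnk⟩
    have hfind := pv_find_colon k rest hnk
    have hsplit := pv_split_colon k rest hnk
    unfold pvStepA pvStepB
    simp only [hk, hfind, hsplit]
    rw [if_neg (show ¬((k.length : Int) = -1) by omega)]
    have htn : ((k.length : Int)).toNat = k.length := by simp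
    have htake : (k ++ ':' :: rest).take ((k.length : Int)).toNat = k := by
      rw [htn]; simp
    have hdrop : (k ++ ':' :: rest).drop (((k.length : Int)).toNat + 1) = rest := by
      rw [htn, show k ++ ':' :: rest = (k ++ [':']) ++ rest by simp,
        show k.length + 1 = (k ++ [':']).length by simp]
      exact List.drop_left
    rw [htake, hdrop]
    have hget : PySem.List.pyGetD [k, rest] (1 : Int) ([] : List Char) = rest := by
      simp [PySem.List.pyGetD]
    rw [hget]
    by_cases hE : k = "Enabled".toList
    · rw [show ("Enabled:".toList = "Enabled".toList ++ [':']) from rfl,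
        if_pos ((pv_startswith_iff _ k rest (by decide) hnk).mpr hE)]
      subst hE
      unfold pvExtract
      simp [PySem.Dict.getD_insert]
    · rw [show ("Enabled:".toList = "Enabled".toList ++ [':']) from rfl,
        if_neg (by rw [pv_startswith_iff "Enabled".toList k rest (by decide) hnk]; exact hE)]
      by_cases hS : k = "Server".toList
      · rw [show ("Server:".toList = "Server".toList ++ [':']) from rfl,
          if_pos ((pv_startswith_iff _ k rest (by decide) hnk).mpr hS)]
        subst hS
        unfold pvExtract
        simp [PySem.Dict.getD_insert]
      · rw [show ("Server:".toList = "Server".toList ++ [':']) from rfl,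
          if_neg (by rw [pv_startswith_iff "Server".toList k rest (by decide) hnk]; exact hS)]
        by_cases hP : k = "Port".toList
        · rw [show ("Port:".toList = "Port".toList ++ [':']) from rfl,
            if_pos ((pv_startswith_iff _ k rest (by decide) hnk).mpr hP)]
          subst hP
          unfold pvExtract
          simp [PySem.Dict.getD_insert]
        · rw [show ("Port:".toList = "Port".toList ++ [':']) from rfl,
            if_neg (by rw [pv_startswith_iff "Port".toList k rest (by decide) hnk]; exact hP)]
          have hE' : ¬((['E','n','a','b','l','e','d'] : List Char) = k) := fun h => hE h.symm
          have hS' : ¬((['S','e','r','v','e','r'] : List Char) = k) := fun h => hS h.symm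
          have hP' : ¬((['P','o','r','t'] : List Char) = k) := fun h => hP h.symm
          unfold pvExtract
          simp [PySem.Dict.getD_insert, hE', hS', hP']
  · unfold pvStepA pvStepB
    simp only [show ("Enabled:".toList = "Enabled".toList ++ [':']) from rfl,
      show ("Server:".toList = "Server".toList ++ [':']) from rfl,
      show ("Port:".toList = "Port".toList ++ [':']) from rfl,
      pv_startswith_no_colon _ "Enabled".toList hcol,
      pv_startswith_no_colon _ "Server".toList hcol,
      pv_startswith_no_colon _ "Port".toList hcol,
      pv_find_no_colon _ hcol]
    simp

lemma pv_fold (lines : List (List Char)) (d : PySem.Dict (List Char) (List Char)) :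
    lines.foldl pvStepA (pvExtract d) = pvExtract (lines.foldl pvStepB d) := by
  induction lines generalizing d with
  | nil => rfl
  | cons l t ih => simp only [List.foldl_cons, pv_step d l, ih]

lemma pv_extract_empty : pvExtract PySem.Dict.empty = (false, "", 0) := by decide

-- ===== VERDICT (by name: the statement is the Claim_ definition above) =====
theorem parse_networksetup_output_spec : Claim_equal_parse_networksetup_output := by
  intro output _
  unfold Spec_parse_networksetup_output parse_networksetup_output parse_networksetup_output_alt
  rw [← pv_extract_empty, pv_fold]
  rfl
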